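-- pv_equiv track=rewrite | github.com/SomeshaHewage/HireLink-X | ml.py | calculate_error_score
-- ===== SOURCE A (Python) =====
-- def calculate_error_score(errors):
--     # Define weights for different types of errors
--     weights = {
--         "spelling_and_grammar": 1,  # Adjust weights based on severity or importance
--         "content_accuracy": 2,
--         "incomplete_information": 3,
--         "repetitive_language": 1,
--         # Add weights for other error types as needed
--     }
--
--     # Calculate error score
--     error_score = 0
--     for error_type, _ in errors:
--         error_score += weights.get(error_type, 0)
--
--     return error_score
-- ===== SOURCE B (Python) =====
-- def calculate_error_score(errors):
--     weights = {
--         "spelling_and_grammar": 1,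
--         "content_accuracy": 2,
--         "incomplete_information": 3,
--         "repetitive_language": 1,
--     }
--     # Tally error types first, then walk the small constant weight table once.
--     counts = {}
--     for error_type, _ in errors:
--         counts[error_type] = counts.get(error_type, 0) + 1
--     total = 0
--     for error_type, weight in weights.items():
--         total += weight * counts.get(error_type, 0)
--     return total
-- ===== Notes on version B (the rewrite author's own statement) =====
-- stated objective: alternative
-- what changed: B tallies error types into a frequency dict in one pass and then computes the score by iterating over the constant weight table (weight * count), instead of looking up the weight of every error inside the loop over errors.
import Mathlib
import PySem

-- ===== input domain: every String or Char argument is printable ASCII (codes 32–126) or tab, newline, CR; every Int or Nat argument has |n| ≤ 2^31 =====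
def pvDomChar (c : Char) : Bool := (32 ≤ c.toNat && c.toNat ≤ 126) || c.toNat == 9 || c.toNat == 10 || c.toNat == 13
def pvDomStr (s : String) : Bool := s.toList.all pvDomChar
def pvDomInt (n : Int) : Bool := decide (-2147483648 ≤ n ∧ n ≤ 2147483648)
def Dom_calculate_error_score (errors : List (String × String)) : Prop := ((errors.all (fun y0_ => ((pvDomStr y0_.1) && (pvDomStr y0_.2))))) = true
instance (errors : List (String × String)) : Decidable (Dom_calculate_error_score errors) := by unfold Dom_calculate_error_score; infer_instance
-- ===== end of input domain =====

-- B tallies error types into a frequency dict, then sums weight * count over the constant weight table; same result as A's per-error weight lookup (objective: alternative).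

-- ===== PORT A =====
-- the literal dict from A's source
def pvWeightsA : PySem.Dict String Int :=
  ((((PySem.Dict.empty.insert "spelling_and_grammar" 1).insert "content_accuracy" 2).insert
      "incomplete_information" 3).insert "repetitive_language" 1)

def calculate_error_score (errors : List (String × String)) : Int :=
  errors.foldl (fun error_score p => error_score + pvWeightsA.getD p.1 0) 0

-- ===== PORT B =====
def calculate_error_score_alt (errors : List (String × String)) : Int :=
  let counts : PySem.Dict String Int :=
    errors.foldl (fun d p => d.insert p.1 (d.getD p.1 0 + 1)) PySem.Dict.empty
  pvWeightsA.items.foldl (fun total kw => total + kw.2 * counts.getD kw.1 0) 0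

-- ===== PRECONDITION & SPEC =====
def Spec_calculate_error_score (errors : List (String × String)) (out : Int) : Prop := out = calculate_error_score_alt errors
instance (errors : List (String × String)) (out : Int) : Decidable (Spec_calculate_error_score errors out) := by unfold Spec_calculate_error_score; infer_instance

-- ===== CLAIM (what is proved, stated in full; the proofs are below) =====
def Claim_equal_calculate_error_score : Prop := ∀ (errors : List (String × String)), Dom_calculate_error_score errors → Spec_calculate_error_score errors (calculate_error_score errors)

-- ===== LEMMAS AND PROOFS =====

-- weight of a single type, as a plain function
def pvW (s : String) : Int :=
  if s = "spelling_and_grammar" then 1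
  else if s = "content_accuracy" then 2
  else if s = "incomplete_information" then 3
  else if s = "repetitive_language" then 1
  else 0

theorem pvWeightsA_getD (s : String) : pvWeightsA.getD s 0 = pvW s := by
  unfold pvWeightsA pvW
  simp [PySem.Dict.getD_insert, PySem.Dict.getD_empty]
  split_ifs <;> simp_all

def pvScore (ts : List String) : Int :=
  (ts.count "spelling_and_grammar" : Int) + 2 * (ts.count "content_accuracy" : Int)
    + 3 * (ts.count "incomplete_information" : Int) + (ts.count "repetitive_language" : Int)

theorem pvFoldA (l : List (String × String)) (acc : Int) :
    l.foldl (fun error_score p => error_score + pvWeightsA.getD p.1 0) acc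
      = acc + pvScore (l.map Prod.fst) := by
  induction l generalizing acc with
  | nil => simp [pvScore]
  | cons p l ih =>
      have hsc : pvScore (p.1 :: l.map Prod.fst) = pvW p.1 + pvScore (l.map Prod.fst) := by
        unfold pvScore pvW
        by_cases h1 : p.1 = "spelling_and_grammar" <;>
          by_cases h2 : p.1 = "content_accuracy" <;>
            by_cases h3 : p.1 = "incomplete_information" <;>
              by_cases h4 : p.1 = "repetitive_language" <;>
                simp_all <;> ring
      simp only [List.foldl_cons, List.map_cons]
      rw [ih, hsc, pvWeightsA_getD]
      ring

theorem pvCounts (errors : List (String × String)) (k : String) :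
    (errors.foldl (fun d p => d.insert p.1 (d.getD p.1 0 + 1)) PySem.Dict.empty).getD k 0
      = ((errors.map Prod.fst).count k : Int) := by
  have hmap : (List.foldl (fun (d : PySem.Dict String Int) (p : String × String) =>
        d.insert p.1 (d.getD p.1 0 + 1)) PySem.Dict.empty errors)
      = List.foldl (fun d x => d.insert x (d.getD x 0 + 1)) PySem.Dict.empty
          (errors.map Prod.fst) := by rw [List.foldl_map]
  rw [hmap]
  rw [PySem.Dict.getD_foldl_insert_add_one]
  simp [PySem.Dict.getD_empty]

theorem pvAltEq (errors : List (String × String)) :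
    calculate_error_score_alt errors = pvScore (errors.map Prod.fst) := by
  have hitems : pvWeightsA.items = [("spelling_and_grammar", (1 : Int)), ("content_accuracy", 2),
      ("incomplete_information", 3), ("repetitive_language", 1)] := rfl
  unfold calculate_error_score_alt
  simp only [hitems, List.foldl_cons, List.foldl_nil, pvCounts]
  unfold pvScore
  ring

-- ===== VERDICT (by name: the statement is the Claim_ definition above) =====
theorem calculate_error_score_spec : Claim_equal_calculate_error_score := by
  intro errors _
  unfold Spec_calculate_error_score calculate_error_score
  rw [pvFoldA, pvAltEq]
  ring
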